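-- pv_equiv track=rewrite | github.com/dkx12341/EEG_wheelchair_software | Python_analyzer/Fix_DSI_csv.py | fix_eeg_data
-- ===== SOURCE A (Python) =====
-- def fix_eeg_data(data_string):
--     eeg_fixed_data_table = []
--     rep_comma = True
--     for char in data_string:
--             if char == ',' or char == '\n':
--                 if char == '\n':
--                      rep_comma = True
--                      eeg_fixed_data_table.append('\n')
--
--                 elif  rep_comma:
--                     eeg_fixed_data_table.append('.')  # Replace the second comma
--                     rep_comma = False
--
--                 else:
--                     eeg_fixed_data_table.append(',')  # Keep the first comma
--                     rep_comma = True
--             else: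
--                 eeg_fixed_data_table.append(char)
--
--     return ''.join(eeg_fixed_data_table)
-- ===== SOURCE B (Python) =====
-- def _fix_line(line):
--     rep = True
--     out = []
--     for ch in line:
--         if ch == ',':
--             if rep:
--                 out.append('.')
--                 rep = False
--             else:
--                 out.append(',')
--                 rep = True
--         else:
--             out.append(ch)
--     return ''.join(out)
--
--
-- def fix_eeg_data(data_string):
--     return '\n'.join(_fix_line(line) for line in data_string.split('\n'))
-- ===== Notes on version B (the rewrite author's own statement) =====
-- stated objective: alternative
-- what changed: B splits the string into lines first and fixes each line independently with a per-line comma toggle, instead of A's single character pass whose flag is reset by newline characters in-stream.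
import Mathlib
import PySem

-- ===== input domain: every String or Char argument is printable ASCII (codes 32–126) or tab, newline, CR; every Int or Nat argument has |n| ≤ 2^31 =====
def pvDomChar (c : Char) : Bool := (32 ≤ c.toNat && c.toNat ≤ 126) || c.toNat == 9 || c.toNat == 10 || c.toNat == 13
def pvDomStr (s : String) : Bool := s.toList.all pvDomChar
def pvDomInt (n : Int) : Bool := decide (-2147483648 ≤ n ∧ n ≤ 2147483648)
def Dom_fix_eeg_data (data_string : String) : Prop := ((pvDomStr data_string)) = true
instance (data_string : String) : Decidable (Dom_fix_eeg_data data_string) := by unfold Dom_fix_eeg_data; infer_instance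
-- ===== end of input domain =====

-- B restructures A: it splits the string into lines first and fixes each line with a
-- per-line comma toggle, instead of A's single in-stream pass with a newline-reset flag.

-- ===== PORT A =====
-- single pass: state = (output table, rep_comma flag); ''.join ported as String.ofList
def fix_eeg_data (data_string : String) : String :=
  let st := data_string.toList.foldl
    (fun (st : List Char × Bool) char =>
      if char = ',' ∨ char = '\n' then
        if char = '\n' then (st.1 ++ ['\n'], true)
        else if st.2 then (st.1 ++ ['.'], false)
        else (st.1 ++ [','], true)
      else (st.1 ++ [char], st.2))
    ([], true)
  String.ofList st.1

-- ===== PORT B =====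
-- per-line comma toggle (rep is the loop's mutable flag, output built structurally)
def fixLine (rep : Bool) : List Char → List Char
  | [] => []
  | c :: cs =>
    if c = ',' then
      if rep then '.' :: fixLine false cs else ',' :: fixLine true cs
    else c :: fixLine rep cs

-- data_string.split('\n') → Chars.splitOn; '\n'.join → Chars.join
def fix_eeg_data_alt (data_string : String) : String :=
  String.ofList (PySem.Chars.join ['\n']
    ((PySem.Chars.splitOn data_string.toList ['\n']).map (fixLine true)))

-- ===== PRECONDITION & SPEC =====
def Spec_fix_eeg_data (data_string : String) (out : String) : Prop := out = fix_eeg_data_alt data_string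
instance (data_string : String) (out : String) : Decidable (Spec_fix_eeg_data data_string out) := by unfold Spec_fix_eeg_data; infer_instance

-- ===== CLAIM (what is proved, stated in full; the proofs are below) =====
def Claim_equal_fix_eeg_data : Prop := ∀ (data_string : String), Dom_fix_eeg_data data_string → Spec_fix_eeg_data data_string (fix_eeg_data data_string)

-- ===== LEMMAS AND PROOFS =====

-- A's pass as a direct recursion
def procA (rep : Bool) : List Char → List Char
  | [] => []
  | c :: cs =>
    if c = ',' ∨ c = '\n' then
      if c = '\n' then '\n' :: procA true cs
      else if rep then '.' :: procA false cs
      else ',' :: procA true cs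
    else c :: procA rep cs

lemma foldA_eq (cs : List Char) : ∀ (acc : List Char) (rep : Bool),
    (cs.foldl
      (fun (st : List Char × Bool) char =>
        if char = ',' ∨ char = '\n' then
          if char = '\n' then (st.1 ++ ['\n'], true)
          else if st.2 then (st.1 ++ ['.'], false)
          else (st.1 ++ [','], true)
        else (st.1 ++ [char], st.2))
      (acc, rep)).1 = acc ++ procA rep cs := by
  induction cs with
  | nil => intro acc rep; simp [procA]
  | cons c cs ih =>
    intro acc rep
    by_cases h : c = ',' ∨ c = '\n'
    · rcases Decidable.em (c = '\n') with h2 | h2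
      · simp [List.foldl_cons, h2, ih, procA]
      · have hc : c = ',' := h.resolve_right h2
        rcases Decidable.em (rep = true) with h3 | h3
        · simp [List.foldl_cons, hc, h3, ih, procA]
        · simp [List.foldl_cons, hc, h3, ih, procA]
    · simp [List.foldl_cons, h, ih, procA]

-- specification of splitOn on the single-char separator '\n'
def splitNL : List Char → List (List Char)
  | [] => [[]]
  | c :: cs =>
    if c = '\n' then [] :: splitNL cs
    else match splitNL cs with
      | [] => [[c]]            -- unreachable: splitNL never returns []
      | l :: ls => (c :: l) :: ls

lemma splitNL_ne_nil (cs : List Char) : splitNL cs ≠ [] := by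
  cases cs with
  | nil => simp [splitNL]
  | cons c cs =>
    simp only [splitNL]
    split
    · simp
    · split <;> simp

-- glue a prefix onto the first chunk
def glue2 (pre : List Char) : List (List Char) → List (List Char)
  | [] => []
  | l :: ls => (pre ++ l) :: ls

lemma go_eq_splitNL : ∀ (fuel : Nat) (l cur : List Char) (acc : List (List Char)),
    l.length < fuel →
    PySem.Chars.splitOn.go ['\n'] fuel l cur acc
      = acc.reverse ++ glue2 cur.reverse (splitNL l) := by
  intro fuel
  induction fuel with
  | zero => intro l cur acc h; omega
  | succ f ih =>
    intro l cur acc h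
    cases l with
    | nil =>
      rw [PySem.Chars.splitOn.go.eq_def]
      simp [splitNL, glue2]
    | cons c rest =>
      by_cases hc : c = '\n'
      · subst hc
        have hpre : List.isPrefixOf ['\n'] ('\n' :: rest) = true := by
          simp [List.isPrefixOf]
        rw [PySem.Chars.splitOn.go.eq_def]
        simp only [hpre, if_pos, List.length_cons, List.drop_succ_cons, List.length_nil, List.drop_zero]
        rw [ih rest [] (cur.reverse :: acc) (by simpa using Nat.lt_of_succ_lt_succ h)]
        obtain ⟨x, xs, hx⟩ : ∃ x xs, splitNL rest = x :: xs := by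
          cases hsp : splitNL rest with
          | nil => exact absurd hsp (splitNL_ne_nil rest)
          | cons x xs => exact ⟨x, xs, rfl⟩
        simp [hx, splitNL, glue2]
      · have hpre : List.isPrefixOf ['\n'] (c :: rest) = false := by
          simp [List.isPrefixOf]
          exact fun hh => absurd hh.symm hc
        rw [PySem.Chars.splitOn.go.eq_def]
        simp only [hpre, Bool.false_eq_true, if_false]
        rw [ih rest (c :: cur) acc (by simpa using Nat.lt_of_succ_lt_succ h)]
        obtain ⟨x, xs, hx⟩ : ∃ x xs, splitNL rest = x :: xs := by
          cases hsp : splitNL rest with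
          | nil => exact absurd hsp (splitNL_ne_nil rest)
          | cons x xs => exact ⟨x, xs, rfl⟩
        simp [hx, splitNL, hc, glue2]

lemma splitOn_eq_splitNL (cs : List Char) :
    PySem.Chars.splitOn cs ['\n'] = splitNL cs := by
  have := go_eq_splitNL (cs.length + 1) cs [] [] (by omega)
  obtain ⟨x, xs, hx⟩ : ∃ x xs, splitNL cs = x :: xs := by
    cases hsp : splitNL cs with
    | nil => exact absurd hsp (splitNL_ne_nil cs)
    | cons x xs => exact ⟨x, xs, rfl⟩
  simpa [PySem.Chars.splitOn, hx, glue2] using this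

-- B's whole result as a function of the split, with the first line's flag generalized
def glueB (rep : Bool) : List (List Char) → List Char
  | [] => []
  | l :: ls => fixLine rep l ++ ls.flatMap (fun l2 => '\n' :: fixLine true l2)

lemma procA_eq_glueB (cs : List Char) : ∀ rep, procA rep cs = glueB rep (splitNL cs) := by
  induction cs with
  | nil => intro rep; simp [procA, splitNL, glueB, fixLine]
  | cons c cs ih =>
    intro rep
    by_cases hn : c = '\n'
    · subst hn
      obtain ⟨x, xs, hx⟩ : ∃ x xs, splitNL cs = x :: xs := by
        cases hsp : splitNL cs with
        | nil => exact absurd hsp (splitNL_ne_nil cs)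
        | cons x xs => exact ⟨x, xs, rfl⟩
      simp [procA, splitNL, glueB, fixLine, ih true, hx]
    · obtain ⟨x, xs, hx⟩ : ∃ x xs, splitNL cs = x :: xs := by
        cases hsp : splitNL cs with
        | nil => exact absurd hsp (splitNL_ne_nil cs)
        | cons x xs => exact ⟨x, xs, rfl⟩
      by_cases hcm : c = ','
      · subst hcm
        cases rep with
        | true => simp [procA, splitNL, hn, hx, glueB, fixLine, ih false]
        | false => simp [procA, splitNL, hn, hx, glueB, fixLine, ih true]
      · simp [procA, splitNL, hn, hcm, hx, glueB, fixLine, ih rep]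

lemma join_map_eq_glueB (ls : List (List Char)) (l : List Char) :
    PySem.Chars.join ['\n'] ((l :: ls).map (fixLine true)) = glueB true (l :: ls) := by
  induction ls generalizing l with
  | nil => simp [PySem.Chars.join, List.intercalate, glueB]
  | cons m ms ih =>
    have := ih m
    simp only [PySem.Chars.join, List.intercalate] at this ⊢
    simp [glueB] at this ⊢
    simp [this]

-- ===== VERDICT (by name: the statement is the Claim_ definition above) =====
theorem fix_eeg_data_spec : Claim_equal_fix_eeg_data := by
  intro s _
  show fix_eeg_data s = fix_eeg_data_alt s
  simp only [fix_eeg_data, fix_eeg_data_alt]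
  rw [foldA_eq, splitOn_eq_splitNL]
  obtain ⟨x, xs, hx⟩ : ∃ x xs, splitNL s.toList = x :: xs := by
    cases hsp : splitNL s.toList with
    | nil => exact absurd hsp (splitNL_ne_nil s.toList)
    | cons x xs => exact ⟨x, xs, rfl⟩
  rw [hx, join_map_eq_glueB, ← hx, ← procA_eq_glueB]
  simp
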